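-- pv_equiv track=rewrite | github.com/romado33/UncommonRhymesV2 | scripts/migrate_words_db.py | _extract_tail_keys
-- ===== SOURCE A (Python) =====
-- VOWELS = {
--     "AA","AE","AH","AO","AW","AY",
--     "EH","ER","EY",
--     "IH","IY",
--     "OW","OY",
--     "UH","UW",
-- }
--
-- def _tokens(pron: str):
--     # Normalize whitespace, split into ARPABET tokens (e.g., 'T AY1 M')
--     return [t for t in pron.strip().split() if t]
--
-- def _is_vowel(tok: str) -> bool:
--     # Accept both 'AY1' and 'AY' as vowel tokens; compare by stripping digits
--     base = tok.rstrip("0123456789")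
--     return base in VOWELS
--
-- def _vowel_key(tok: str) -> str:
--     # Preserve stress number if present; e.g., 'AY1'
--     return tok
--
-- def _extract_tail_keys(pron: str):
--     """
--     Given an ARPABET pron string, return (vowel_key, coda_key, rime_key).
--     - vowel_key: last vowel token (incl. stress), e.g., 'AY1'
--     - coda_key: concatenated consonant tokens after that vowel, e.g., 'M' or 'ND'
--     - rime_key: f'{vowel_key}-{coda_key}' (or just vowel_key if no coda)
--     """
--     toks = _tokens(pron)
--     if not toks:
--         return ("", "", "")
--     # Find last vowel index
--     v_idx = -1
--     for i in range(len(toks) - 1, -1, -1):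
--         if _is_vowel(toks[i]):
--             v_idx = i
--             break
--     if v_idx == -1:
--         # No vowel found; treat entire tail as coda
--         return ("", "".join(toks), "".join(toks))
--     vowel = _vowel_key(toks[v_idx])
--     after = toks[v_idx + 1 :]
--     coda = "".join(after) if after else ""
--     rime = f"{vowel}-{coda}" if coda else vowel
--     return (vowel, coda, rime)
-- ===== SOURCE B (Python) =====
-- VOWELS = {
--     "AA","AE","AH","AO","AW","AY",
--     "EH","ER","EY",
--     "IH","IY",
--     "OW","OY",
--     "UH","UW",
-- }
--
-- def _is_vowel(tok: str) -> bool: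
--     return tok.rstrip("0123456789") in VOWELS
--
-- def _extract_tail_keys(pron: str):
--     # Single forward pass: track the latest vowel seen and the tokens after it.
--     vowel = ""
--     found = False
--     coda_parts = []
--     for tok in pron.strip().split():
--         if _is_vowel(tok):
--             vowel, found, coda_parts = tok, True, []
--         else:
--             coda_parts.append(tok)
--     coda = "".join(coda_parts)
--     if not found:
--         return ("", coda, coda)
--     return (vowel, coda, f"{vowel}-{coda}" if coda else vowel)
-- ===== Notes on version B (the rewrite author's own statement) =====
-- stated objective: alternative
-- what changed: Replaces the reverse index range-scan for the last vowel plus a tail slice with a single forward pass that keeps the latest vowel and an accumulator of the tokens after it.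
import Mathlib
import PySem

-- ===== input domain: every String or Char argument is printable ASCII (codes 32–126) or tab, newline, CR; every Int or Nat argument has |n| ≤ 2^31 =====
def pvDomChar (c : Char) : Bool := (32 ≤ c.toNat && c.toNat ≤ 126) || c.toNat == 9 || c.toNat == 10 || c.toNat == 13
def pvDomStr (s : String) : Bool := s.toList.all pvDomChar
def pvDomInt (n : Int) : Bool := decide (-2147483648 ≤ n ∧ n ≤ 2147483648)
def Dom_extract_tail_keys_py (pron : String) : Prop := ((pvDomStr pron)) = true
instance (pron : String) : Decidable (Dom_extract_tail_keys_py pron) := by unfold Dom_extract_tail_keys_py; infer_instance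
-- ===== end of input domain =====

-- B replaces A's reverse index range-scan for the last vowel (plus a tail slice) with one
-- forward pass keeping the latest vowel and an accumulator of the tokens after it (objective: alternative).

-- ===== PORT A =====

-- the VOWELS set (membership test on a fixed literal set; order never observed)
def pvVOWELS : List (List Char) :=
  ["AA","AE","AH","AO","AW","AY","EH","ER","EY","IH","IY","OW","OY","UH","UW"].map String.toList

-- tok.rstrip("0123456789"): exact — Char.isDigit is exactly membership in "0123456789"
def pvRstripDigits (cs : List Char) : List Char :=
  (cs.reverse.dropWhile (fun c => c.isDigit)).reverse

-- _is_vowel (shared helper of both Pythons)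
def pvIsVowel (tok : String) : Bool :=
  pvVOWELS.contains (pvRstripDigits tok.toList)

-- _tokens: [t for t in pron.strip().split() if t]
def pvTokens (pron : String) : List String :=
  (PySem.Str.split₀ (PySem.Str.strip pron)).filter (fun t => t.toList ≠ [])

-- the reverse loop "for i in range(len(toks)-1,-1,-1): if _is_vowel(toks[i]): v_idx = i; break"
def pvFindLast (toks : List String) : List Int → Int
  | [] => -1
  | i :: rest => if pvIsVowel (PySem.List.pyGetD toks i "") then i else pvFindLast toks rest

def extract_tail_keys_py (pron : String) : String × String × String :=
  let toks := pvTokens pron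
  if toks.isEmpty then ("", "", "")
  else
    let v_idx := pvFindLast toks (PySem.List.pyRange (PySem.List.len toks - 1) (-1) (-1))
    if v_idx = -1 then ("", PySem.Str.join "" toks, PySem.Str.join "" toks)
    else
      let vowel := PySem.List.pyGetD toks v_idx ""
      let after := PySem.List.slice toks (some (v_idx + 1)) none
      let coda := if ¬ after.isEmpty then PySem.Str.join "" after else ""
      let rime := if coda.toList ≠ [] then PySem.Str.join "" [vowel, "-", coda] else vowel
      (vowel, coda, rime)

-- ===== PORT B =====

-- one forward pass: state = (vowel, found, coda_parts)
def pvStepB (acc : String × Bool × List String) (tok : String) : String × Bool × List String :=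
  if pvIsVowel tok then (tok, true, []) else (acc.1, acc.2.1, acc.2.2 ++ [tok])

def extract_tail_keys_py_alt (pron : String) : String × String × String :=
  let st := (PySem.Str.split₀ (PySem.Str.strip pron)).foldl pvStepB ("", false, [])
  let coda := PySem.Str.join "" st.2.2
  if st.2.1 then
    (st.1, coda, if coda.toList ≠ [] then PySem.Str.join "" [st.1, "-", coda] else st.1)
  else ("", coda, coda)

-- ===== PRECONDITION & SPEC =====
def Spec_extract_tail_keys_py (pron : String) (out : String × String × String) : Prop := out = extract_tail_keys_py_alt pron
instance (pron : String) (out : String × String × String) : Decidable (Spec_extract_tail_keys_py pron out) := by unfold Spec_extract_tail_keys_py; infer_instance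

-- ===== CLAIM (what is proved, stated in full; the proofs are below) =====
def Claim_equal_extract_tail_keys_py : Prop := ∀ (pron : String), Dom_extract_tail_keys_py pron → Spec_extract_tail_keys_py pron (extract_tail_keys_py pron)

-- ===== LEMMAS AND PROOFS =====

-- split() never yields an empty token
theorem pv_split₀_go_ne_nil (s : List Char) : ∀ (cur : List Char) (acc : List (List Char)),
    (∀ t ∈ acc, t ≠ []) → ∀ t ∈ PySem.Chars.split₀.go s cur acc, t ≠ [] := by
  induction s with
  | nil =>
    intro cur acc hacc t ht
    simp only [PySem.Chars.split₀.go] at ht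
    split at ht
    · exact hacc t (List.mem_reverse.mp ht)
    · rw [List.mem_reverse, List.mem_cons] at ht
      rcases ht with rfl | h
      · rename_i hcur
        intro hrev
        exact hcur (by simp [List.reverse_eq_nil_iff] at hrev; simp [hrev])
      · exact hacc t h
  | cons c rest ih =>
    intro cur acc hacc t ht
    simp only [PySem.Chars.split₀.go] at ht
    split at ht
    · split at ht
      · exact ih _ _ hacc t ht
      · refine ih _ _ ?_ t ht
        intro u hu
        rcases List.mem_cons.mp hu with rfl | hu
        · rename_i hcur
          intro hrev
          exact hcur (by simp [List.reverse_eq_nil_iff] at hrev; simp [hrev])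
        · exact hacc u hu
    · exact ih _ _ hacc t ht

theorem pv_split₀_tok_ne_nil (s : String) : ∀ t ∈ PySem.Str.split₀ s, t.toList ≠ [] := by
  intro t ht
  have hmem : t.toList ∈ PySem.Chars.split₀ s.toList := by
    rw [← PySem.Str.split₀_map_toList]
    exact List.mem_map_of_mem ht
  exact pv_split₀_go_ne_nil s.toList [] [] (by simp) t.toList hmem

theorem pvTokens_eq (pron : String) :
    pvTokens pron = PySem.Str.split₀ (PySem.Str.strip pron) := by
  unfold pvTokens
  exact List.filter_eq_self.mpr (fun t ht => by
    simpa using pv_split₀_tok_ne_nil (PySem.Str.strip pron) t ht)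

-- pvFindLast ignores a trailing element when all inspected indices lie inside ts
theorem pvFindLast_append (ts : List String) (t : String) (idxs : List Int)
    (h : ∀ i ∈ idxs, 0 ≤ i ∧ i < (ts.length : Int)) :
    pvFindLast (ts ++ [t]) idxs = pvFindLast ts idxs := by
  induction idxs with
  | nil => rfl
  | cons i rest ih =>
    have hi := h i (by simp)
    have hget : PySem.List.pyGetD (ts ++ [t]) i "" = PySem.List.pyGetD ts i "" := by
      rw [PySem.List.pyGetD_eq_getElem (ts ++ [t]) "" hi.1 (by simp; omega),
          PySem.List.pyGetD_eq_getElem ts "" hi.1 (by simpa using hi.2)]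
      exact List.getElem_append_left (by omega)
    simp only [pvFindLast, hget]
    split
    · rfl
    · exact ih (fun j hj => h j (by simp [hj]))

-- indices produced by range(len-1,-1,-1) lie inside the list
theorem pv_mem_range_lt (n : Nat) (i : Int)
    (h : i ∈ PySem.List.pyRange ((n : Int) - 1) (-1) (-1)) : 0 ≤ i ∧ i < (n : Int) := by
  rw [PySem.List.pyRange_neg_one_eq_reverse, List.mem_reverse] at h
  have := PySem.List.mem_pyRange_one.mp (by simpa using h)
  omega

-- the invariant tying A's reverse search to B's forward fold
theorem pv_core (ts : List String) :
    (pvFindLast ts (PySem.List.pyRange ((ts.length : Int) - 1) (-1) (-1)) = -1 →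
      ts.foldl pvStepB ("", false, []) = ("", false, ts)) ∧
    (∀ n : Nat, pvFindLast ts (PySem.List.pyRange ((ts.length : Int) - 1) (-1) (-1)) = (n : Int) →
      n < ts.length ∧
      ts.foldl pvStepB ("", false, []) = (PySem.List.pyGetD ts (n : Int) "", true, ts.drop (n + 1))) := by
  induction ts using List.reverseRecOn with
  | nil =>
    constructor
    · intro _; rfl
    · intro n hn
      rw [PySem.List.pyRange_neg_one_eq_nil (by norm_num)] at hn
      simp [pvFindLast] at hn
  | append_singleton ts t ih =>
    have hlen : ((ts ++ [t]).length : Int) - 1 = (ts.length : Int) := by simp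
    have hcons : PySem.List.pyRange ((ts.length : Int)) (-1) (-1)
        = (ts.length : Int) :: PySem.List.pyRange ((ts.length : Int) - 1) (-1) (-1) :=
      PySem.List.pyRange_neg_one_cons (by omega)
    have hgetlast : PySem.List.pyGetD (ts ++ [t]) (ts.length : Int) "" = t := by
      rw [PySem.List.pyGetD_eq_getElem (ts ++ [t]) "" (by omega) (by simp)]
      simp
    have hfold : (ts ++ [t]).foldl pvStepB ("", false, []) =
        pvStepB (ts.foldl pvStepB ("", false, [])) t := by
      simp [List.foldl_append]
    by_cases hv : pvIsVowel t = true
    · -- last token is a vowel: index = len ts, fold state resets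
      have hfind : pvFindLast (ts ++ [t]) (PySem.List.pyRange (((ts ++ [t]).length : Int) - 1) (-1) (-1))
          = (ts.length : Int) := by
        rw [hlen, hcons]
        simp [pvFindLast, hgetlast, hv]
      constructor
      · intro habs; rw [hfind] at habs; omega
      · intro n hn
        rw [hfind] at hn
        have hn' : n = ts.length := by exact_mod_cast hn.symm
        subst hn'
        refine ⟨by simp, ?_⟩
        have hdrop : (ts ++ [t]).drop (ts.length + 1) = [] := by simp
        rw [hfold, hgetlast, hdrop]
        simp [pvStepB, hv]
    · -- last token not a vowel: the search skips it, the fold appends it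
      have hskip : pvFindLast (ts ++ [t]) (PySem.List.pyRange (((ts ++ [t]).length : Int) - 1) (-1) (-1))
          = pvFindLast ts (PySem.List.pyRange ((ts.length : Int) - 1) (-1) (-1)) := by
        rw [hlen, hcons]
        simp only [pvFindLast, hgetlast, hv, if_false, Bool.false_eq_true]
        exact pvFindLast_append ts t _ (fun i hi => pv_mem_range_lt ts.length i hi)
      constructor
      · intro h
        rw [hskip] at h
        rw [hfold, ih.1 h]
        simp [pvStepB, hv]
      · intro n hn
        rw [hskip] at hn
        obtain ⟨hlt, hst⟩ := ih.2 n hn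
        refine ⟨by simp; omega, ?_⟩
        have hget : PySem.List.pyGetD (ts ++ [t]) (n : Int) "" = PySem.List.pyGetD ts (n : Int) "" := by
          rw [PySem.List.pyGetD_eq_getElem (ts ++ [t]) "" (by omega) (by simp; omega),
              PySem.List.pyGetD_eq_getElem ts "" (by omega) (by exact_mod_cast hlt)]
          exact List.getElem_append_left (by omega)
        have hdrop : (ts ++ [t]).drop (n + 1) = ts.drop (n + 1) ++ [t] :=
          List.drop_append_of_le_length (by omega)
        rw [hfold, hst]
        simp [pvStepB, hv, hget, hdrop]

-- A's v_idx is -1 or a natural number below the length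
theorem pvFindLast_cases (ts : List String) :
    pvFindLast ts (PySem.List.pyRange ((ts.length : Int) - 1) (-1) (-1)) = -1 ∨
    ∃ n : Nat, pvFindLast ts (PySem.List.pyRange ((ts.length : Int) - 1) (-1) (-1)) = (n : Int) := by
  have key : ∀ idxs : List Int, (∀ i ∈ idxs, 0 ≤ i) →
      pvFindLast ts idxs = -1 ∨ ∃ n : Nat, pvFindLast ts idxs = (n : Int) := by
    intro idxs h
    induction idxs with
    | nil => left; rfl
    | cons i rest ih =>
      simp only [pvFindLast]
      split
      · right
        exact ⟨i.toNat, (Int.toNat_of_nonneg (h i (by simp))).symm⟩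
      · exact ih (fun j hj => h j (by simp [hj]))
  exact key _ (fun i hi => (pv_mem_range_lt ts.length i hi).1)

-- ===== VERDICT (by name: the statement is the Claim_ definition above) =====
theorem extract_tail_keys_py_spec : Claim_equal_extract_tail_keys_py := by
  intro pron _
  unfold Spec_extract_tail_keys_py
  simp only [extract_tail_keys_py, extract_tail_keys_py_alt, pvTokens_eq, PySem.List.len_eq]
  generalize PySem.Str.split₀ (PySem.Str.strip pron) = ts
  rcases pvFindLast_cases ts with hneg | ⟨n, hn⟩
  · -- no vowel found
    have hst := (pv_core ts).1 hneg
    rw [hneg, hst]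
    rcases ts with _ | ⟨a, l⟩
    · simp [PySem.Str.join]
    · simp
  · -- last vowel at index n
    obtain ⟨hlt, hst⟩ := (pv_core ts).2 n hn
    have hnil : ts.isEmpty = false := by
      cases ts with
      | nil => simp at hlt
      | cons a l => rfl
    rw [hn, hst]
    simp only [hnil, Bool.false_eq_true, if_false, if_neg (by omega : ¬ (n : Int) = -1)]
    have hslice : PySem.List.slice ts (some ((n : Int) + 1)) none = ts.drop (n + 1) := by
      rw [PySem.List.slice_from ts (by omega)]
      norm_num
    rw [hslice]
    -- the "if after else empty" guard is redundant: join of [] is ""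
    by_cases hafter : ts.drop (n + 1) = []
    · simp [hafter, PySem.Str.join]
    · simp [hafter]
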